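-- pv_equiv track=rewrite | github.com/elevne/Algorithm-Study | baekjoon/in-process/6064.py | get_calender
-- ===== SOURCE A (Python) =====
-- def get_calender(m, n, x, y):
--     k = x
--     while k <= m * n:
--         if k % n == y:
--             return k
--         else:
--             k += m
--     return -1
-- ===== SOURCE B (Python) =====
-- def get_calender(m, n, x, y):
--     # CRT-style: solve x + i*m == y (mod n) directly with the extended
--     # Euclidean algorithm instead of scanning the arithmetic progression.
--     if not (0 <= y < n):
--         return -1
--
--     def egcd(a, b):
--         if b == 0:
--             return a, 1, 0
--         g, s, t = egcd(b, a % b)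
--         return g, t, s - (a // b) * t
--
--     g, s, _ = egcd(m, n)
--     d = y - x
--     if d % g != 0:
--         return -1
--     np_ = n // g
--     i0 = ((d // g) * s) % np_
--     k = x + i0 * m
--     return k if k <= m * n else -1
-- ===== Notes on version B (the rewrite author's own statement) =====
-- stated objective: faster
-- what changed: A scans the arithmetic progression x, x+m, x+2m, ... up to m*n testing k % n == y; B solves the congruence x + i*m = y (mod n) in closed form with a hand-written extended Euclidean algorithm (CRT) and checks the single candidate against the m*n bound.
-- outside the precondition, e.g. on get_calender(1, -2, -5, -1): A returns -5, B returns -1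
import Mathlib
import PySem

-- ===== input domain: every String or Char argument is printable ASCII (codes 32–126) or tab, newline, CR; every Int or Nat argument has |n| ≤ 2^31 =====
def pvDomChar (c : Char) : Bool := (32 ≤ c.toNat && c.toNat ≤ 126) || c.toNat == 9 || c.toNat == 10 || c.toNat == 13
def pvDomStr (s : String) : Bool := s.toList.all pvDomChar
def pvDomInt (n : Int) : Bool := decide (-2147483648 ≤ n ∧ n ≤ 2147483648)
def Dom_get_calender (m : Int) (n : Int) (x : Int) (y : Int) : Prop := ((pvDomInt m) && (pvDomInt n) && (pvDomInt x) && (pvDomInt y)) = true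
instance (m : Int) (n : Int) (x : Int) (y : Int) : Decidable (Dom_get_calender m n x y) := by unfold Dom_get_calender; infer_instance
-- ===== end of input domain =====

-- B replaces A's linear scan of the progression x, x+m, x+2m, … by solving the
-- congruence x + i*m ≡ y (mod n) with a hand-written extended Euclidean algorithm
-- (CRT); equal return values are proved on Pre_ (the problem's natural domain m ≥ 1, n ≥ 1).

-- ===== PORT A =====
-- A's while-loop as fuel recursion; under Pre_ (m ≥ 1) the fuel (m*n - x).toNat + 1
-- provably exceeds the number of iterations, so it is only a totality guard.
def pvScanA (m : Int) (n : Int) (y : Int) : Nat → Int → Int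
  | 0, _ => -1
  | fuel + 1, k =>
    if k ≤ m * n then
      if PySem.Int.mod k n = y then k
      else pvScanA m n y fuel (k + m)
    else -1

def get_calender (m : Int) (n : Int) (x : Int) (y : Int) : Int :=
  pvScanA m n y ((m * n - x).toNat + 1) x

-- ===== PORT B =====
-- helper: |a % b| < |b| for b ≠ 0 (termination of pvEgcd)
theorem pvMod_natAbs_lt (a b : Int) (hb : b ≠ 0) :
    (PySem.Int.mod a b).natAbs < b.natAbs := by
  rcases lt_or_gt_of_ne hb with h | h
  · have := PySem.Int.mod_neg_bounds a h
    omega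
  · have h1 := PySem.Int.mod_nonneg a h
    have h2 := PySem.Int.mod_lt a h
    omega

-- Source B's hand-written recursive extended Euclid, step for step
def pvEgcd (a : Int) (b : Int) : Int × Int × Int :=
  if b = 0 then (a, 1, 0)
  else
    let r := pvEgcd b (PySem.Int.mod a b)
    (r.1, r.2.2, r.2.1 - PySem.Int.floordiv a b * r.2.2)
termination_by b.natAbs
decreasing_by exact pvMod_natAbs_lt a b (by assumption)

def get_calender_alt (m : Int) (n : Int) (x : Int) (y : Int) : Int :=
  if 0 ≤ y ∧ y < n then
    let g := (pvEgcd m n).1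
    let s := (pvEgcd m n).2.1
    let d := y - x
    if PySem.Int.mod d g ≠ 0 then -1
    else
      let np := PySem.Int.floordiv n g
      let i0 := PySem.Int.mod (PySem.Int.floordiv d g * s) np
      let k := x + i0 * m
      if k ≤ m * n then k else -1
  else -1

-- ===== PRECONDITION & SPEC =====
-- Pre_ admits the problem's natural domain (Baekjoon 6064: both moduli positive) plus
-- the degenerate slices where A trivially returns -1 without entering the loop
-- (x > m*n with n ≤ 0, or with m ≤ 0 and x > m). Outside it A raises
-- ZeroDivisionError (n = 0 with x ≤ 0), loops forever (e.g. m ≤ 0 with x ≤ m*n and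
-- no match), or scans a backward progression (m ≤ 0) whose first match B need not mimic.
def Pre_get_calender (m : Int) (n : Int) (x : Int) (y : Int) : Prop :=
  (1 ≤ m ∧ 1 ≤ n) ∨ (m * n < x ∧ n ≤ 0) ∨ (m * n < x ∧ m ≤ 0 ∧ m < x)
instance (m : Int) (n : Int) (x : Int) (y : Int) : Decidable (Pre_get_calender m n x y) := by
  unfold Pre_get_calender; infer_instance

def pvWitness_get_calender : Int × Int × Int × Int := (3, 2, 1, 1)

def Spec_get_calender (m : Int) (n : Int) (x : Int) (y : Int) (out : Int) : Prop := out = get_calender_alt m n x y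
instance (m : Int) (n : Int) (x : Int) (y : Int) (out : Int) : Decidable (Spec_get_calender m n x y out) := by unfold Spec_get_calender; infer_instance

-- ===== CLAIM (what is proved, stated in full; the proofs are below) =====
def Claim_equal_get_calender : Prop := ∀ (m : Int) (n : Int) (x : Int) (y : Int), Dom_get_calender m n x y → Pre_get_calender m n x y → Spec_get_calender m n x y (get_calender m n x y)


-- ===== LEMMAS AND PROOFS =====

-- pvEgcd returns (g, s, t) with g >= 0, g | a, g | b, s*a + t*b = g (b >= 0; a >= 0 when b = 0)
theorem pvEgcd_spec (b a : Int) (hb : 0 ≤ b) (hab : b = 0 → 0 ≤ a) :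
    0 ≤ (pvEgcd a b).1 ∧ (pvEgcd a b).1 ∣ a ∧ (pvEgcd a b).1 ∣ b ∧
      (pvEgcd a b).2.1 * a + (pvEgcd a b).2.2 * b = (pvEgcd a b).1 := by
  induction a, b using pvEgcd.induct with
  | case1 a =>
    rw [pvEgcd]; simp only [if_true]
    exact ⟨hab rfl, dvd_refl a, dvd_zero a, by ring⟩
  | case2 a b h ih =>
    have hbpos : 0 < b := lt_of_le_of_ne hb (Ne.symm h)
    have hmn := PySem.Int.mod_nonneg a hbpos
    have ih' := ih hmn (fun h0 => le_of_lt hbpos)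
    rw [pvEgcd]; simp only [if_neg h]
    set r := pvEgcd b (PySem.Int.mod a b) with hr
    obtain ⟨h0, hda, hdb, hbez⟩ := ih'
    have hfm := PySem.Int.floordiv_mul_add_mod a b
    refine ⟨h0, ?_, hda, ?_⟩
    · -- r.1 ∣ a  since a = (a//b)*b + a%b
      have : a = PySem.Int.floordiv a b * b + PySem.Int.mod a b := hfm.symm
      rw [this]
      exact dvd_add (Dvd.dvd.mul_left hda _) hdb
    · have hm : PySem.Int.mod a b = a - PySem.Int.floordiv a b * b := by linarith [hfm]
      rw [hm] at hbez
      linear_combination hbez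

-- A's scan returns -1 when no admissible step matches; and the j-th step when it is
-- the first match and the fuel suffices
theorem pvScanA_stop (m n y : Int) :
    ∀ (fuel : Nat) (x : Int),
      (∀ i : Nat, x + (i : Int) * m ≤ m * n → PySem.Int.mod (x + (i : Int) * m) n ≠ y) →
      pvScanA m n y fuel x = -1 := by
  intro fuel
  induction fuel with
  | zero => intro x _; rfl
  | succ f ih =>
    intro x hno
    show (if x ≤ m * n then _ else _) = -1
    by_cases hx : x ≤ m * n
    · rw [if_pos hx]
      have h0 := hno 0 (by simpa using hx)
      simp only [Nat.cast_zero, zero_mul, add_zero] at h0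
      rw [if_neg h0]
      apply ih
      intro i hi hc
      have h1 : x + ((i + 1 : Nat) : Int) * m ≤ m * n := by push_cast; linarith
      apply hno (i + 1) h1
      push_cast
      convert hc using 2
      ring
    · rw [if_neg hx]

theorem pvScanA_find (m n y : Int) (hm : 1 ≤ m) :
    ∀ (j : Nat) (fuel : Nat) (x : Int), j < fuel →
      x + (j : Int) * m ≤ m * n →
      PySem.Int.mod (x + (j : Int) * m) n = y →
      (∀ i : Nat, i < j → PySem.Int.mod (x + (i : Int) * m) n ≠ y) →
      pvScanA m n y fuel x = x + (j : Int) * m := by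
  intro j
  induction j with
  | zero =>
    intro fuel x hf hle hmod _
    obtain ⟨f, rfl⟩ : ∃ f, fuel = f + 1 := ⟨fuel - 1, by omega⟩
    simp only [Nat.cast_zero, zero_mul, add_zero] at hle hmod ⊢
    show (if x ≤ m * n then _ else _) = x
    rw [if_pos hle, if_pos hmod]
  | succ j ih =>
    intro fuel x hf hle hmod hfirst
    obtain ⟨f, rfl⟩ : ∃ f, fuel = f + 1 := ⟨fuel - 1, by omega⟩
    have hxle : x ≤ m * n := by
      have : (0:Int) ≤ ((j:Int) + 1) * m := by positivity
      push_cast at hle; linarith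
    show (if x ≤ m * n then _ else _) = _
    rw [if_pos hxle]
    have h0 := hfirst 0 (Nat.succ_pos j)
    simp only [Nat.cast_zero, zero_mul, add_zero] at h0
    rw [if_neg h0]
    have := ih f (x + m) (by omega)
      (by push_cast at hle ⊢; linarith)
      (by push_cast at hmod ⊢; convert hmod using 2; ring)
      (by intro i hi
          have := hfirst (i + 1) (by omega)
          push_cast at this ⊢
          intro hc; apply this; convert hc using 2; ring)
    rw [this]; push_cast; ring

-- the heart of the equivalence: first match of A's scan = B's CRT solution
theorem pvMain (m n x y : Int) (hm : 1 ≤ m) (hn : 1 ≤ n) :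
    get_calender m n x y = get_calender_alt m n x y := by
  have hn0 : (0:Int) < n := by omega
  obtain ⟨hg0, hgm, hgn, hbez⟩ := pvEgcd_spec n m (by omega) (fun h => absurd h (by omega))
  have hg1 : 1 ≤ (pvEgcd m n).1 := by
    rcases eq_or_lt_of_le hg0 with h | h
    · exfalso; rw [← h] at hgm; have := zero_dvd_iff.mp hgm; omega
    · omega
  have hgpos : (0:Int) < (pvEgcd m n).1 := hg1
  have hgne : (pvEgcd m n).1 ≠ 0 := by omega
  simp only [get_calender, get_calender_alt]
  by_cases hy : 0 ≤ y ∧ y < n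
  · -- y is a possible remainder
    have hmodiff : ∀ k : Int, PySem.Int.mod k n = y ↔ n ∣ (k - y) := by
      intro k
      rw [PySem.Int.mod_eq_emod_of_pos hn0]
      conv_lhs => rw [show y = y % n from (Int.emod_eq_of_lt hy.1 hy.2).symm]
      rw [Int.emod_eq_emod_iff_emod_sub_eq_zero]
      exact PySem.Int.emod_eq_zero_iff_dvd _ n
    rw [if_pos hy]
    by_cases hd : (pvEgcd m n).1 ∣ (y - x)
    · -- congruence solvable
      rw [if_neg (by simpa [PySem.Int.mod_eq_zero_iff_dvd] using hd)]
      have hn'eq : (pvEgcd m n).1 * PySem.Int.floordiv n (pvEgcd m n).1 = n := by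
        rw [PySem.Int.floordiv_eq_ediv_of_pos hgpos]; exact Int.mul_ediv_cancel' hgn
      set n' := PySem.Int.floordiv n (pvEgcd m n).1 with hn'def
      have hn'pos : (0:Int) < n' := by nlinarith [hn'eq]
      have hqe : (pvEgcd m n).1 * PySem.Int.floordiv (y - x) (pvEgcd m n).1 = y - x := by
        rw [PySem.Int.floordiv_eq_ediv_of_pos hgpos]; exact Int.mul_ediv_cancel' hd
      set q := PySem.Int.floordiv (y - x) (pvEgcd m n).1 with hqdef
      set i0 := PySem.Int.mod (q * (pvEgcd m n).2.1) n' with hi0def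
      have hi0lo : 0 ≤ i0 := PySem.Int.mod_nonneg _ hn'pos
      have hi0hi : i0 < n' := PySem.Int.mod_lt _ hn'pos
      have hi0m : n' ∣ (i0 - q * (pvEgcd m n).2.1) := by
        refine ⟨-((q * (pvEgcd m n).2.1) / n'), ?_⟩
        rw [hi0def, PySem.Int.mod_eq_emod_of_pos hn'pos, Int.emod_def]; ring
      have hcong : ∀ i : Int, (n ∣ (x + i * m - y)) ↔ n' ∣ (i - q * (pvEgcd m n).2.1) := by
        intro i
        constructor
        · rintro ⟨c, hc⟩
          refine ⟨(pvEgcd m n).2.1 * c + i * (pvEgcd m n).2.2, ?_⟩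
          apply mul_left_cancel₀ hgne
          linear_combination (-((pvEgcd m n).2.1 * c) - i * (pvEgcd m n).2.2) * hn'eq
            - i * hbez + (pvEgcd m n).2.1 * hc - (pvEgcd m n).2.1 * hqe
        · rintro ⟨c, hc2⟩
          obtain ⟨m', hm'⟩ := hgm
          refine ⟨m' * c - q * (pvEgcd m n).2.2, ?_⟩
          linear_combination hqe + q * hbez + m * hc2 + c * m' * hn'eq + c * n' * hm'
      have hmin : ∀ i : Int, 0 ≤ i → n' ∣ (i - q * (pvEgcd m n).2.1) → i0 ≤ i := by
        intro i hi hdv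
        by_contra hlt
        have hsub : n' ∣ (i0 - i) := by
          have := hi0m.sub hdv
          simpa using this
        have := Int.le_of_dvd (by omega) hsub
        omega
      by_cases hk : x + i0 * m ≤ m * n
      · rw [if_pos hk]
        have hjle : i0 ≤ m * n - x := by nlinarith
        have hj : ((i0.toNat : Nat) : Int) = i0 := Int.toNat_of_nonneg hi0lo
        rw [pvScanA_find m n y hm i0.toNat _ x (by omega) (by rw [hj]; exact hk)
          (by rw [hj]; exact (hmodiff _).mpr ((hcong i0).mpr hi0m))
          ?_]
        · rw [hj]
        · intro i hi hc
          have h1 : n' ∣ ((i : Int) - q * (pvEgcd m n).2.1) := (hcong i).mp ((hmodiff _).mp hc)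
          have := hmin i (by positivity) h1
          omega
      · rw [if_neg hk]
        apply pvScanA_stop
        intro i hle hc
        have h1 := hmin i (by positivity) ((hcong i).mp ((hmodiff _).mp hc))
        have : i0 * m ≤ (i : Int) * m := mul_le_mul_of_nonneg_right h1 (by omega)
        omega
    · -- no solution to the congruence: g does not divide y - x
      rw [if_pos (by simpa [PySem.Int.mod_eq_zero_iff_dvd] using hd)]
      apply pvScanA_stop
      intro i hle hc
      apply hd
      have h1 : n ∣ ((i : Int) * m - (y - x)) := by
        have := (hmodiff _).mp hc
        convert this using 1; ring
      have h2 : (pvEgcd m n).1 ∣ ((i : Int) * m - (y - x)) := dvd_trans hgn h1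
      have h3 : (pvEgcd m n).1 ∣ (i : Int) * m := Dvd.dvd.mul_left hgm _
      have := h3.sub h2
      simpa using this
  · -- y can never be a remainder mod n
    rw [if_neg hy]
    apply pvScanA_stop
    intro i _ hc
    rw [PySem.Int.mod_eq_emod_of_pos hn0] at hc
    have h1 := Int.emod_nonneg (x + (i : Int) * m) (by omega : n ≠ 0)
    have h2 := Int.emod_lt_of_pos (x + (i : Int) * m) hn0
    exact hy ⟨by omega, by omega⟩

-- x > m*n with m ≤ 0 and x > m: A fails its loop test at once; B either fails one of
-- its tests or its lone candidate x + i0*m (0 ≤ i0 < n/g ≤ n) overshoots m*n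
theorem pvSide (m n x y : Int) (hm0 : m ≤ 0) (hx1 : m * n < x) (hx2 : m < x) :
    get_calender m n x y = get_calender_alt m n x y := by
  simp only [get_calender, pvScanA, get_calender_alt]
  rw [if_neg (by omega : ¬ x ≤ m * n)]
  by_cases hy : 0 ≤ y ∧ y < n
  · rw [if_pos hy]
    obtain ⟨hg0, hgm, hgn, hbez⟩ := pvEgcd_spec n m (by omega) (fun h => absurd h (by omega))
    have hg1 : 1 ≤ (pvEgcd m n).1 := by
      rcases eq_or_lt_of_le hg0 with h | h
      · exfalso; rw [← h] at hgn; have := zero_dvd_iff.mp hgn; omega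
      · omega
    by_cases hd : PySem.Int.mod (y - x) (pvEgcd m n).1 ≠ 0
    · rw [if_pos hd]
    · rw [if_neg hd]
      have hn'eq : (pvEgcd m n).1 * PySem.Int.floordiv n (pvEgcd m n).1 = n := by
        rw [PySem.Int.floordiv_eq_ediv_of_pos (by omega : (0:Int) < (pvEgcd m n).1)]
        exact Int.mul_ediv_cancel' hgn
      set n' := PySem.Int.floordiv n (pvEgcd m n).1 with hn'def
      have hn'pos : (0:Int) < n' := by nlinarith
      have hn'le : n' ≤ n := by nlinarith
      set i0 := PySem.Int.mod (PySem.Int.floordiv (y - x) (pvEgcd m n).1 * (pvEgcd m n).2.1) n' with hi0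
      have h1 : 0 ≤ i0 := PySem.Int.mod_nonneg _ hn'pos
      have h2 : i0 < n' := PySem.Int.mod_lt _ hn'pos
      have h3 : (n - 1) * m ≤ i0 * m := mul_le_mul_of_nonpos_right (by omega) hm0
      have hbig : ¬ (x + i0 * m ≤ m * n) := by
        have hr : m + (n - 1) * m = n * m := by ring
        intro hc; nlinarith
      rw [if_neg hbig]
  · rw [if_neg hy]

-- ===== VERDICT (by name: the statement is the Claim_ definition above) =====
theorem get_calender_spec : Claim_equal_get_calender := by
  intro m n x y _ hp
  unfold Spec_get_calender
  rcases hp with ⟨hm, hn⟩ | ⟨hx, hn⟩ | ⟨hx1, hm0, hx2⟩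
  · exact pvMain m n x y hm hn
  · -- x > m*n with n ≤ 0: A fails its loop test at once, B fails the 0 ≤ y < n test
    show pvScanA m n y ((m * n - x).toNat + 1) x = _
    simp only [pvScanA, get_calender_alt]
    rw [if_neg (by omega : ¬ x ≤ m * n), if_neg (by omega : ¬ (0 ≤ y ∧ y < n))]
  · exact pvSide m n x y hm0 hx1 hx2
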